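-- pv_equiv track=rewrite | github.com/ColdCode0214/LeetCode_local | 周赛/【315周赛】2443-反转之后的数字和.py | sumOfNumberAndReverse
-- ===== SOURCE A (Python) =====
-- def sumOfNumberAndReverse(num: int) -> bool:
--     for i in range(num+1):
--         temp = str(i)
--         temp = temp[::-1]
--         cur = int(temp)
--         if cur + i == num:
--             return True
--     return False
-- ===== SOURCE B (Python) =====
-- def _digits(n):
--     # LSB-first decimal digits of n (n >= 0); [0] for n == 0
--     if n == 0:
--         return [0]
--     out = []
--     while n > 0:
--         out.append(n % 10)
--         n //= 10
--     return out
--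
--
-- def _dec(ds):
--     # digit list (LSB-first, no leading zero) of value-1, for a list of value >= 1
--     head, rest = ds[0], ds[1:]
--     if head > 0:
--         return [head - 1] + rest
--     r = _dec(rest)
--     return [9] if r == [0] else [9] + r
--
--
-- def sumOfNumberAndReverse(num: int) -> bool:
--     # Descending scan with a base-10 odometer: the digit list of the candidate i is
--     # maintained incrementally (borrowing decrement), and the reversed numeral is
--     # built directly from that digit state instead of str(i)[::-1].
--     if num < 0:
--         return False
--     ds = _digits(num)
--     i = num
--     while i >= 0:
--         if i + int("".join("0123456789"[d] for d in ds)) == num: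
--             return True
--         if i > 0:
--             ds = _dec(ds)
--         i -= 1
--     return False
-- ===== Notes on version B (the rewrite author's own statement) =====
-- stated objective: alternative
-- what changed: Replaces A's ascending counter with per-candidate str(i)[::-1] slicing by a descending scan that maintains the candidate's digit list as a base-10 odometer (borrowing decrement) and builds each reversed numeral directly from that digit state; no str(i) or slicing.
import Mathlib
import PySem

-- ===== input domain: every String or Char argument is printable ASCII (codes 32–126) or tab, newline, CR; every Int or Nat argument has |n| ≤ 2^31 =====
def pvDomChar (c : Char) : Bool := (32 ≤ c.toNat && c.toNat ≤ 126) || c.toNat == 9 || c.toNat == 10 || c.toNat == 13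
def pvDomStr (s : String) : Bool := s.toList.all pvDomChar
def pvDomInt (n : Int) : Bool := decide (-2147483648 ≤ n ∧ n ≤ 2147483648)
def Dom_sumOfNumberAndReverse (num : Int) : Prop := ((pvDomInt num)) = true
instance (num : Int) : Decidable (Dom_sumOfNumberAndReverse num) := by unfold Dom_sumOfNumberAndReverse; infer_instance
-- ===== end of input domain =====

-- B replaces A's ascending counter with per-candidate str(i)[::-1] slicing by a
-- descending scan that maintains the candidate's digit list as a base-10 odometer
-- (borrowing decrement) and builds each reversed numeral from that digit state
-- (alternative structure, same candidate set and per-candidate cost).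

-- ===== PORT A =====
-- the for-loop over range(num+1) with early 'return True'
def pvLoopA (num : Int) : List Int → Bool
  | [] => false                                                       -- return False
  | i :: rest =>
    let temp := PySem.Int.toChars i                                   -- temp = str(i)
    let temp2 := (PySem.Chars.slice? temp none none (-1)).getD []     -- temp = temp[::-1] (step -1 never raises)
    let cur := (PySem.Int.ofChars? temp2).getD 0                      -- cur = int(temp); int() cannot raise on a reversed decimal numeral
    if cur + i == num then true else pvLoopA num rest

def sumOfNumberAndReverse (num : Int) : Bool :=
  pvLoopA num (PySem.List.pyRange 0 (num + 1) 1)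

-- ===== PORT B =====
-- _digits: while n > 0: out.append(n % 10); n //= 10
def pvDigitsLoop (n : Int) (out : List Int) : List Int :=
  if h : 0 < n then
    pvDigitsLoop (PySem.Int.floordiv n 10) (out ++ [PySem.Int.mod n 10])
  else out
termination_by n.toNat
decreasing_by
  rw [PySem.Int.floordiv_eq_ediv_of_pos (by norm_num : (0:Int) < 10)]
  omega

def pvDigits (n : Int) : List Int :=                                  -- _digits(n)
  if n == 0 then [0] else pvDigitsLoop n []

-- _dec: head, rest = ds[0], ds[1:]  (ds is never empty on any reachable state)
def pvDec : List Int → List Int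
  | [] => []                                                          -- ds[0] would raise; unreachable from the entry point
  | head :: rest =>
    if 0 < head then (head - 1) :: rest
    else
      let r := pvDec rest
      if r == [0] then [9] else 9 :: r

def pvDigitChars : List Char := ['0', '1', '2', '3', '4', '5', '6', '7', '8', '9']

-- "".join("0123456789"[d] for d in ds); every reachable d lies in [0, 9]
def pvJoin (ds : List Int) : List Char :=
  ds.map (fun d => PySem.List.pyGetD pvDigitChars d '0')

-- the while i >= 0 loop
def pvLoopB (num i : Int) (ds : List Int) : Bool :=
  if h : 0 ≤ i then
    if i + (PySem.Int.ofChars? (pvJoin ds)).getD 0 == num then true   -- int() cannot raise on a nonempty digit string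
    else pvLoopB num (i - 1) (if 0 < i then pvDec ds else ds)
  else false
termination_by (i + 1).toNat
decreasing_by omega

def sumOfNumberAndReverse_alt (num : Int) : Bool :=
  if num < 0 then false
  else pvLoopB num num (pvDigits num)

-- ===== PRECONDITION & SPEC =====
def Spec_sumOfNumberAndReverse (num : Int) (out : Bool) : Prop := out = sumOfNumberAndReverse_alt num
instance (num : Int) (out : Bool) : Decidable (Spec_sumOfNumberAndReverse num out) := by unfold Spec_sumOfNumberAndReverse; infer_instance

-- ===== CLAIM (what is proved, stated in full; the proofs are below) =====
def Claim_equal_sumOfNumberAndReverse : Prop := ∀ (num : Int), Dom_sumOfNumberAndReverse num → Spec_sumOfNumberAndReverse num (sumOfNumberAndReverse num)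

-- ===== LEMMAS AND PROOFS =====

-- the digit list (least significant first) that B's odometer maintains for a value n
def pvDlist (n : Nat) : List Int :=
  if n = 0 then [0] else (Nat.digits 10 n).map Int.ofNat

-- A's per-candidate test, as a function of the candidate
def pvTestA (num i : Int) : Bool :=
  ((PySem.Int.ofChars? ((PySem.Chars.slice? (PySem.Int.toChars i) none none (-1)).getD [])).getD 0 + i == num)

theorem pvLoopA_eq_any (num : Int) (l : List Int) :
    pvLoopA num l = l.any (pvTestA num) := by
  induction l with
  | nil => rfl
  | cons i rest ih =>
      show (if pvTestA num i then true else pvLoopA num rest) = _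
      by_cases h : pvTestA num i = true
      · simp [h]
      · simp only [Bool.not_eq_true] at h
        simp [h, ih]

-- _digits agrees with Nat.digits
theorem pvDigitsLoop_eq (n : Nat) : ∀ out, 0 < n →
    pvDigitsLoop (n : Int) out = out ++ (Nat.digits 10 n).map Int.ofNat := by
  induction n using Nat.strong_induction_on with
  | _ n ih =>
    intro out hn
    rw [pvDigitsLoop]
    rw [dif_pos (by exact_mod_cast hn)]
    rw [show PySem.Int.floordiv (n : Int) 10 = ((n / 10 : Nat) : Int) from PySem.Int.floordiv_natCast n 10]
    rw [show PySem.Int.mod (n : Int) 10 = ((n % 10 : Nat) : Int) from PySem.Int.mod_natCast n 10]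
    rw [Nat.digits_def' (by norm_num : 1 < 10) hn]
    by_cases h10 : 0 < n / 10
    · rw [ih (n / 10) (Nat.div_lt_self hn (by norm_num)) _ h10]
      simp
    · have : n / 10 = 0 := by omega
      rw [this]
      simp [pvDigitsLoop]

theorem pvDigits_eq (n : Nat) : pvDigits (n : Int) = pvDlist n := by
  unfold pvDigits pvDlist
  by_cases h : n = 0
  · subst h; rfl
  · rw [if_neg (by simpa using h), if_neg h, pvDigitsLoop_eq n [] (by omega), List.nil_append]

theorem pvDlist_eq_zero_iff (n : Nat) : pvDlist n = [0] ↔ n = 0 := by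
  constructor
  · intro hl
    by_contra h
    unfold pvDlist at hl
    rw [if_neg h] at hl
    have hdig : Nat.digits 10 n = [0] := by
      rcases hd : Nat.digits 10 n with _ | ⟨d, rest⟩
      · rw [hd] at hl; exact absurd hl (by simp)
      · rw [hd, List.map_cons] at hl
        obtain ⟨h1, h2⟩ := List.cons_eq_cons.mp hl
        rw [Int.ofNat_eq_natCast] at h1
        have hd0 : d = 0 := by exact_mod_cast h1
        rw [hd0, List.map_eq_nil_iff.mp h2]
    have hn := Nat.ofDigits_digits 10 n
    rw [hdig] at hn
    simp [Nat.ofDigits] at hn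
    exact h hn.symm
  · intro hn; subst hn; rfl

-- pvDlist at a positive value, unfolded one digit
theorem pvDlist_pos (n : Nat) (hn : n ≠ 0) :
    pvDlist n = ((n % 10 : Nat) : Int) :: (Nat.digits 10 (n / 10)).map Int.ofNat := by
  unfold pvDlist
  rw [if_neg hn, Nat.digits_def' (by norm_num : 1 < 10) (by omega)]
  rfl

-- the borrowing decrement realises n ↦ n - 1 on digit lists
theorem pvDec_dlist (n : Nat) (hn : 0 < n) : pvDec (pvDlist n) = pvDlist (n - 1) := by
  induction n using Nat.strong_induction_on with
  | _ n ih =>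
    rw [pvDlist_pos n (by omega), pvDec]
    by_cases hmod : 0 < n % 10
    · rw [if_pos (by exact_mod_cast hmod)]
      by_cases h1 : n = 1
      · subst h1; decide
      · have hd : (n - 1) % 10 = n % 10 - 1 := by omega
        have hq : (n - 1) / 10 = n / 10 := by omega
        rw [pvDlist_pos (n - 1) (by omega), hd, hq]
        congr 1
        push_cast [Nat.cast_sub (by omega : 1 ≤ n % 10)]
        ring
    · have hmod0 : n % 10 = 0 := by omega
      have h10 : 10 ≤ n := by omega
      rw [if_neg (by simp [hmod0])]
      have hrec : pvDec ((Nat.digits 10 (n / 10)).map Int.ofNat) = pvDlist (n / 10 - 1) := by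
        have : (Nat.digits 10 (n / 10)).map Int.ofNat = pvDlist (n / 10) := by
          unfold pvDlist; rw [if_neg (by omega)]
        rw [this]
        exact ih (n / 10) (by omega) (by omega)
      rw [hrec]
      by_cases hq1 : n / 10 = 1
      · have hn10 : n = 10 := by omega
        subst hn10
        decide
      · have hne : pvDlist (n / 10 - 1) ≠ [0] := by
          intro hcontra
          exact absurd ((pvDlist_eq_zero_iff _).mp hcontra) (by omega)
        rw [if_neg (by simpa using hne)]
        have hd : (n - 1) % 10 = 9 := by omega
        have hq' : (n - 1) / 10 = n / 10 - 1 := by omega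
        rw [pvDlist_pos (n - 1) (by omega), hd, hq']
        unfold pvDlist
        rw [if_neg (by omega)]
        norm_num

-- Nat.toDigits via Nat.digits
theorem toDigitsCore_eq (f : Nat) : ∀ n acc, 0 < n → n ≤ f →
    Nat.toDigitsCore 10 f n acc = ((Nat.digits 10 n).map Nat.digitChar).reverse ++ acc := by
  induction f with
  | zero => intro n acc h1 h2; omega
  | succ f ih =>
    intro n acc h1 h2
    rw [Nat.toDigitsCore]
    rw [Nat.digits_def' (by norm_num : 1 < 10) h1]
    by_cases h10 : n / 10 = 0
    · rw [if_pos h10, h10]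
      simp
    · rw [if_neg h10]
      rw [ih (n / 10) _ (by omega) (by have := Nat.div_lt_self h1 (by norm_num : 1 < 10); omega)]
      simp

theorem toChars_natCast (n : Nat) :
    PySem.Int.toChars (n : Int) =
      (if n = 0 then ['0'] else ((Nat.digits 10 n).map Nat.digitChar).reverse) := by
  unfold PySem.Int.toChars
  rw [if_neg (by omega)]
  by_cases h : n = 0
  · subst h; rfl
  · rw [if_neg h]
    show Nat.toDigits 10 (n : Int).toNat = _
    rw [Int.toNat_natCast, Nat.toDigits]
    exact (toDigitsCore_eq (n + 1) n [] (by omega) (by omega)).trans (by simp)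

-- the char table lookup is Nat.digitChar on [0, 9]
theorem pvLookup_eq (d : Nat) (hd : d < 10) :
    PySem.List.pyGetD pvDigitChars (d : Int) '0' = Nat.digitChar d := by
  interval_cases d <;> decide

-- the join over a digit list, digit by digit
theorem pvJoin_mapNat : ∀ (l : List Nat), (∀ d ∈ l, d < 10) →
    pvJoin (l.map Int.ofNat) = l.map Nat.digitChar
  | [], _ => rfl
  | d :: rest, h => by
    show PySem.List.pyGetD pvDigitChars (Int.ofNat d) '0'
        :: pvJoin (rest.map Int.ofNat) = _
    rw [Int.ofNat_eq_natCast, pvLookup_eq d (h d (by simp)),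
      pvJoin_mapNat rest (fun x hx => h x (by simp [hx]))]
    rfl

-- B's join of the digit state is exactly A's reversed numeral
theorem pvJoin_dlist (n : Nat) :
    pvJoin (pvDlist n) = ((PySem.Chars.slice? (PySem.Int.toChars (n : Int)) none none (-1)).getD []) := by
  rw [show PySem.Chars.slice? (PySem.Int.toChars (n : Int)) none none (-1) =
      some (PySem.Int.toChars (n : Int)).reverse from PySem.List.slice?_none_none_neg_one _]
  rw [toChars_natCast]
  by_cases h : n = 0
  · subst h; decide
  · unfold pvDlist
    rw [if_neg h, if_neg h]
    simp only [Option.getD_some, List.reverse_reverse]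
    exact pvJoin_mapNat _ (fun d hd => Nat.digits_lt_base (by norm_num) hd)

-- B's per-step probe equals A's per-candidate test
theorem pvTest_eq (num : Int) (k : Nat) :
    ((k : Int) + (PySem.Int.ofChars? (pvJoin (pvDlist k))).getD 0 == num) = pvTestA num (k : Int) := by
  unfold pvTestA
  rw [pvJoin_dlist, Int.add_comm]

-- B's loop over the odometer states probes exactly the candidates 0..k
theorem pvLoopB_eq_any (num : Int) (k : Nat) :
    pvLoopB num (k : Int) (pvDlist k) =
      (PySem.List.pyRange 0 ((k : Int) + 1) 1).any (pvTestA num) := by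
  induction k with
  | zero =>
    have h0 : ((0 : Nat) : Int) = 0 := by norm_num
    rw [pvLoopB, dif_pos (by omega)]
    rw [show PySem.List.pyRange 0 (((0 : Nat) : Int) + 1) 1 = [(0 : Int)] from by
      rw [h0]; exact PySem.List.pyRange_one_singleton 0]
    rw [List.any_cons, List.any_nil, Bool.or_false]
    have ht := pvTest_eq num 0
    by_cases hc : pvTestA num ((0 : Nat) : Int) = true
    · rw [if_pos (ht.trans hc)]
      simpa using hc.symm
    · simp only [Bool.not_eq_true] at hc
      rw [if_neg (by rw [ht, hc]; simp),
        show ((0 : Nat) : Int) - 1 = -1 from by norm_num,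
        pvLoopB, dif_neg (by norm_num)]
      simpa using hc.symm
  | succ k ih =>
    have hc1 : ((k + 1 : Nat) : Int) = (k : Int) + 1 := by push_cast; ring
    rw [pvLoopB, dif_pos (by positivity), hc1]
    have hstep : (if (0 : Int) < (k : Int) + 1 then pvDec (pvDlist (k + 1)) else pvDlist (k + 1))
        = pvDlist k := by
      rw [if_pos (by positivity), pvDec_dlist (k + 1) (by omega)]
      simp
    have hi : (k : Int) + 1 - 1 = ((k : Nat) : Int) := by ring
    rw [hstep, hi, ih]
    rw [PySem.List.pyRange_one_succ_right (show (0 : Int) ≤ (k : Int) + 1 by positivity)]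
    rw [List.any_append, List.any_cons, List.any_nil, Bool.or_false]
    have ht := pvTest_eq num (k + 1)
    rw [hc1] at ht
    by_cases hcs : pvTestA num ((k : Int) + 1) = true
    · rw [if_pos (ht.trans hcs), hcs, Bool.or_true]
    · simp only [Bool.not_eq_true] at hcs
      rw [if_neg (by rw [ht, hcs]; simp), hcs, Bool.or_false]

-- ===== VERDICT (by name: the statement is the Claim_ definition above) =====
theorem sumOfNumberAndReverse_spec : Claim_equal_sumOfNumberAndReverse := by
  intro num _
  show sumOfNumberAndReverse num = sumOfNumberAndReverse_alt num
  rw [sumOfNumberAndReverse, sumOfNumberAndReverse_alt]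
  by_cases h : num < 0
  · rw [if_pos h, pvLoopA_eq_any, PySem.List.pyRange_one_eq_nil (by omega)]
    rfl
  · rw [if_neg h]
    have hnum : num = ((num.toNat : Nat) : Int) := by omega
    rw [pvLoopA_eq_any]
    rw [hnum, pvDigits_eq, pvLoopB_eq_any]
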